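-- pv_equiv track=rewrite | github.com/nascarsayan/lintcode | 751.py | business
-- ===== SOURCE A (Python) =====
-- from collections import deque
--
-- def business(A, k):
--   # Write your code here
--   k = abs(k)
--   que = deque()
--   size = len(A)
--   mn = A[:]
--   for i in range(size):
--     while (que and A[que[-1]] >= A[i]):
--       que.pop()
--     que.append(i)
--     if que[0] < i - k:
--       que.popleft()
--     mn[i] = min(mn[i], A[que[0]])
--   que = deque()
--   for i in range(size)[::-1]:
--     while (que and A[que[0]] >= A[i]):
--       que.popleft()
--     que.appendleft(i)
--     if que[-1] > i + k:
--       que.pop()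
--     mn[i] = min(mn[i], A[que[-1]])
--   return list(map(lambda x: x[0] - x[1], list(zip(A, mn))))
-- ===== SOURCE B (Python) =====
-- def business(A, k):
--   # Direct window scan: answer[i] = A[i] - min(A[max(0,i-k) : min(n,i+k+1)])
--   k = abs(k)
--   n = len(A)
--   return [A[i] - min(A[max(0, i - k):min(n, i + k + 1)]) for i in range(n)]
-- ===== Notes on version B (the rewrite author's own statement) =====
-- stated objective: simpler
-- what changed: Replaced the two monotonic-deque passes plus a final zip with a single comprehension that recomputes each window minimum by slicing A[max(0,i-k):min(n,i+k+1)] directly.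
import Mathlib
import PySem

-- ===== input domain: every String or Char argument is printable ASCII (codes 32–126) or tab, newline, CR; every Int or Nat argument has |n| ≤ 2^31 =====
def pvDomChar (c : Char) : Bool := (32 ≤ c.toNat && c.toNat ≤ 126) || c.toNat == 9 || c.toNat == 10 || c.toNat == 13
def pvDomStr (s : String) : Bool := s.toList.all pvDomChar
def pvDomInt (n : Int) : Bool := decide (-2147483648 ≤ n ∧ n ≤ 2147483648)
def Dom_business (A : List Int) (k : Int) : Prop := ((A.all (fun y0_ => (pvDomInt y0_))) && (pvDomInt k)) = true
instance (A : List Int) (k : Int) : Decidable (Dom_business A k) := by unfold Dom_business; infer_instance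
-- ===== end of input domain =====

-- B replaces A's two monotonic-deque passes by a direct per-index window scan (simpler, not faster).

-- ===== PORT A =====
-- one iteration of A's first loop (ascending i); deque `que` holds indices, `mn` is the min array.
-- indices handed to pyGetD are always in range in A's loops, so the default 0 is never returned.
def businessStep1 (A : List Int) (k : Int) (st : List Int × List Int) (i : Int) :
    List Int × List Int :=
  -- while que and A[que[-1]] >= A[i]: que.pop()
  let que1 := st.1.rdropWhile (fun j => decide (PySem.List.pyGetD A i 0 ≤ PySem.List.pyGetD A j 0))
  -- que.append(i)
  let que2 := que1 ++ [i]
  -- if que[0] < i - k: que.popleft()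
  let que3 := if PySem.List.pyGetD que2 0 0 < i - k then que2.tail else que2
  -- mn[i] = min(mn[i], A[que[0]])
  (que3, PySem.List.pySetD st.2 i
      (min (PySem.List.pyGetD st.2 i 0) (PySem.List.pyGetD A (PySem.List.pyGetD que3 0 0) 0)))

-- one iteration of A's second loop (descending i)
def businessStep2 (A : List Int) (k : Int) (st : List Int × List Int) (i : Int) :
    List Int × List Int :=
  -- while que and A[que[0]] >= A[i]: que.popleft()
  let que1 := st.1.dropWhile (fun j => decide (PySem.List.pyGetD A i 0 ≤ PySem.List.pyGetD A j 0))
  -- que.appendleft(i)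
  let que2 := i :: que1
  -- if que[-1] > i + k: que.pop()
  let que3 := if i + k < PySem.List.pyGetD que2 (-1) 0 then que2.dropLast else que2
  -- mn[i] = min(mn[i], A[que[-1]])
  (que3, PySem.List.pySetD st.2 i
      (min (PySem.List.pyGetD st.2 i 0) (PySem.List.pyGetD A (PySem.List.pyGetD que3 (-1) 0) 0)))

def business (A : List Int) (k : Int) : List Int :=
  let k' := |k|
  let size : Int := (A.length : Int)
  -- mn = A[:]
  let st1 := (PySem.List.pyRange 0 size 1).foldl (businessStep1 A k') ([], A)
  -- range(size)[::-1] is the reversed range list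
  let st2 := ((PySem.List.pyRange 0 size 1).reverse).foldl (businessStep2 A k') ([], st1.2)
  List.zipWith (fun a b => a - b) A st2.2

-- ===== PORT B =====
-- the slice is nonempty for every i in range(n), so Python's min never raises; .getD 0 is unreached
def business_alt (A : List Int) (k : Int) : List Int :=
  let k' := |k|
  let n : Int := (A.length : Int)
  (PySem.List.pyRange 0 n 1).map (fun i =>
    PySem.List.pyGetD A i 0 -
      ((PySem.List.min? (PySem.List.slice A (some (max 0 (i - k'))) (some (min n (i + k' + 1))))
        (fun x => x)).getD 0))

-- ===== PRECONDITION & SPEC =====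
def Spec_business (A : List Int) (k : Int) (out : List Int) : Prop := out = business_alt A k
instance (A : List Int) (k : Int) (out : List Int) : Decidable (Spec_business A k out) := by unfold Spec_business; infer_instance

-- ===== CLAIM (what is proved, stated in full; the proofs are below) =====
def Claim_equal_business : Prop := ∀ (A : List Int) (k : Int), Dom_business A k → Spec_business A k (business A k)

-- ===== LEMMAS AND PROOFS =====

-- value of A at a Nat index (0 if out of range; loops only use in-range indices)
def bag (A : List Int) (j : Nat) : Int := A.getD j 0

-- running minimum of bag A over a list of indices, seeded with x
def bfmin (A : List Int) (x : Int) (l : List Nat) : Int :=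
  l.foldl (fun m t => min m (bag A t)) x

-- minimum of bag A over the index window [lo, i]
def bwmin (A : List Int) (lo i : Nat) : Int := bfmin A (bag A lo) (List.range' (lo+1) (i-lo))

-- `keep A i j` : A[j] is strictly below every later value of the window ending at i  (pass-1 deque membership)
def bkeep (A : List Int) (i j : Nat) : Bool :=
  (List.range' (j+1) (i-j)).all (fun t => decide (bag A j < bag A t))

-- canonical pass-1 deque for window [lo, i]
def bcdq (A : List Int) (lo i : Nat) : List Nat :=
  (List.range' lo (i+1-lo)).filter (bkeep A i)

-- `bkeep2 A i j` : A[j] is strictly below every earlier value from i on  (pass-2 deque membership)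
def bkeep2 (A : List Int) (i j : Nat) : Bool :=
  (List.range' i (j-i)).all (fun t => decide (bag A j < bag A t))

-- canonical pass-2 deque for window [i, hi]
def bcdq2 (A : List Int) (i hi : Nat) : List Nat :=
  (List.range' i (hi+1-i)).filter (bkeep2 A i)

-- deque state after the first m iterations of pass 1
def bdq (A : List Int) (kk m : Nat) : List Nat :=
  if m = 0 then [] else bcdq A (m - 1 - kk) (m - 1)

-- mn array after the first m iterations of pass 1
def bmn1 (A : List Int) (kk : Nat) : Nat → List Int
  | 0 => A
  | m+1 => (bmn1 A kk m).set m (bwmin A (m - kk) m)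

-- deque state after the first c iterations of pass 2 (which processes i = n-1 … n-c)
def bdq2 (A : List Int) (kk n c : Nat) : List Nat :=
  if c = 0 then [] else bcdq2 A (n - c) (min (n - 1) (n - c + kk))

-- mn array after the first c iterations of pass 2
def bmn2 (A : List Int) (kk n : Nat) : Nat → List Int
  | 0 => bmn1 A kk n
  | c+1 => (bmn2 A kk n c).set (n - c - 1)
      (min (bwmin A (n - c - 1 - kk) (n - c - 1))
           (bwmin A (n - c - 1) (min (n - 1) (n - c - 1 + kk))))

-- generic facts about the running minimum bfmin
lemma bfmin_append (A : List Int) (x : Int) (l1 l2 : List Nat) :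
    bfmin A x (l1 ++ l2) = bfmin A (bfmin A x l1) l2 := List.foldl_append ..

lemma bfmin_min (A : List Int) (a x : Int) (l : List Nat) :
    bfmin A (min a x) l = min a (bfmin A x l) := by
  induction l generalizing x with
  | nil => rfl
  | cons t l ih =>
    show bfmin A (min (min a x) (bag A t)) l = min a (bfmin A (min x (bag A t)) l)
    rw [min_assoc, ih]

lemma bfmin_le_init (A : List Int) (x : Int) (l : List Nat) : bfmin A x l ≤ x := by
  induction l generalizing x with
  | nil => exact le_rfl
  | cons t l ih =>
    exact le_trans (ih (min x (bag A t))) (min_le_left _ _)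

lemma bfmin_le_mem (A : List Int) (x : Int) {l : List Nat} {t : Nat} (ht : t ∈ l) :
    bfmin A x l ≤ bag A t := by
  induction l generalizing x with
  | nil => cases ht
  | cons s l ih =>
    rcases List.mem_cons.1 ht with h | h
    · subst h
      exact le_trans (bfmin_le_init A _ l) (min_le_right _ _)
    · exact ih _ h
lemma le_bfmin (A : List Int) {c x : Int} {l : List Nat} (hx : c ≤ x)
    (h : ∀ t ∈ l, c ≤ bag A t) : c ≤ bfmin A x l := by
  induction l generalizing x with
  | nil => exact hx
  | cons s l ih =>
    exact ih (le_min hx (h s (List.mem_cons_self ..))) (fun t ht => h t (List.mem_cons_of_mem _ ht))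

-- facts about the window minimum bwmin
lemma bwmin_self (A : List Int) (lo : Nat) : bwmin A lo lo = bag A lo := by
  simp [bwmin, bfmin]

lemma bwmin_le (A : List Int) {lo t i : Nat} (h1 : lo ≤ t) (h2 : t ≤ i) :
    bwmin A lo i ≤ bag A t := by
  rcases Nat.eq_or_lt_of_le h1 with h | h
  · subst h; exact bfmin_le_init ..
  · exact bfmin_le_mem A _ (by rw [List.mem_range'_1]; omega)

lemma bwmin_cons (A : List Int) {lo i : Nat} (h : lo < i) :
    bwmin A lo i = min (bag A lo) (bwmin A (lo+1) i) := by
  have h1 : i - lo = (i - (lo+1)) + 1 := by omega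
  have h2 : List.range' (lo+1) (i - lo) = (lo+1) :: List.range' (lo+2) (i - (lo+1)) := by
    rw [h1, List.range'_succ]
  rw [bwmin, h2]
  show bfmin A (min (bag A lo) (bag A (lo+1))) _ = _
  rw [bfmin_min]
  rfl

lemma bwmin_concat (A : List Int) {lo i : Nat} (h : lo ≤ i) :
    bwmin A lo (i+1) = min (bwmin A lo i) (bag A (i+1)) := by
  have h1 : i + 1 - lo = (i - lo) + 1 := by omega
  have h2 : List.range' (lo+1) (i + 1 - lo) = List.range' (lo+1) (i - lo) ++ [i+1] := by
    rw [h1, List.range'_concat]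
    congr 2
    omega
  rw [bwmin, h2, bfmin_append]
  rfl

lemma bwmin_eq_bag (A : List Int) {lo i : Nat}
    (h : ∀ t, lo < t → t ≤ i → bag A lo < bag A t) : bwmin A lo i = bag A lo := by
  refine le_antisymm (bfmin_le_init ..) (le_bfmin A le_rfl ?_)
  intro t ht
  rw [List.mem_range'_1] at ht
  exact le_of_lt (h t (by omega) (by omega))

lemma bwmin_split (A : List Int) {lo mid hi : Nat} (h1 : lo ≤ mid) (h2 : mid ≤ hi) :
    min (bwmin A lo mid) (bwmin A mid hi) = bwmin A lo hi := by
  have hr : List.range' (lo+1) (mid - lo) ++ List.range' (mid+1) (hi - mid)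
      = List.range' (lo+1) (hi - lo) := by
    have := List.range'_append (s := lo+1) (m := mid - lo) (n := hi - mid) (step := 1)
    rw [show lo + 1 + 1 * (mid - lo) = mid + 1 by omega] at this
    rw [this]
    congr 1
    omega
  conv_rhs => rw [bwmin, ← hr, bfmin_append]
  show min (bwmin A lo mid) (bwmin A mid hi) = bfmin A (bwmin A lo mid) (List.range' (mid+1) (hi-mid))
  calc min (bwmin A lo mid) (bwmin A mid hi)
      = min (bwmin A lo mid) (bfmin A (bag A mid) (List.range' (mid+1) (hi-mid))) := rfl
    _ = bfmin A (min (bwmin A lo mid) (bag A mid)) (List.range' (mid+1) (hi-mid)) :=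
        (bfmin_min ..).symm
    _ = bfmin A (bwmin A lo mid) (List.range' (mid+1) (hi-mid)) := by
        rw [min_eq_left (bwmin_le A h1 le_rfl)]

-- dropping from the back of a value-monotone list is filtering
lemma rdropWhile_cons_of_neg {α : Type} (q : α → Bool) (a : α) (t : List α) (h : q a = false) :
    (a :: t).rdropWhile q = a :: t.rdropWhile q := by
  rw [List.rdropWhile, List.rdropWhile, List.reverse_cons, List.dropWhile_append]
  split
  · next he =>
    rw [List.isEmpty_iff, List.dropWhile_eq_nil_iff] at he
    have : t.reverse.dropWhile q = [] := by
      rw [List.dropWhile_eq_nil_iff]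
      intro x hx
      exact he x (by simp [hx])
    simp [this, h]
  · simp

lemma chain_rdropWhile {α : Type} (q : α → Bool) (l : List α)
    (h : l.Pairwise (fun a b => q a = true → q b = true)) :
    l.rdropWhile q = l.filter (fun a => !q a) := by
  induction l with
  | nil => rfl
  | cons a t ih =>
    rcases List.pairwise_cons.1 h with ⟨ha, ht⟩
    cases hq : q a with
    | true =>
      have hall : ∀ x ∈ a :: t, q x = true := by
        intro x hx
        rcases List.mem_cons.1 hx with rfl | hx
        · exact hq
        · exact ha x hx hq
      rw [List.rdropWhile_eq_nil_iff.2 hall]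
      rw [List.filter_cons_of_neg (by simp [hq])]
      have : ∀ x ∈ t, (fun a => !q a) x ≠ true := by
        intro x hx
        simp [ha x hx hq]
      rw [List.filter_eq_nil_iff.2 this]
    | false =>
      rw [rdropWhile_cons_of_neg q a t hq, ih ht, List.filter_cons_of_pos (by simp [hq])]

lemma chain_dropWhile {α : Type} (q : α → Bool) (l : List α)
    (h : l.Pairwise (fun a b => q b = true → q a = true)) :
    l.dropWhile q = l.filter (fun a => !q a) := by
  induction l with
  | nil => rfl
  | cons a t ih =>
    rcases List.pairwise_cons.1 h with ⟨ha, ht⟩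
    cases hq : q a with
    | true =>
      rw [List.dropWhile_cons_of_pos hq, ih ht, List.filter_cons_of_neg (by simp [hq])]
    | false =>
      rw [List.dropWhile_cons_of_neg (by simp [hq]), List.filter_cons_of_pos (by simp [hq]),
        List.filter_eq_self.2 ?_]
      intro x hx
      cases hqx : q x with
      | true => exact absurd (ha x hx hqx) (by simp [hq])
      | false => simp

-- membership / characterisation of the pass-1 deque
lemma bkeep_iff (A : List Int) (i j : Nat) :
    bkeep A i j = true ↔ ∀ t, j < t → t ≤ i → bag A j < bag A t := by
  rw [bkeep, List.all_eq_true]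
  constructor
  · intro h t h1 h2
    have := h t (by rw [List.mem_range'_1]; omega)
    simpa using this
  · intro h t ht
    rw [List.mem_range'_1] at ht
    simpa using h t (by omega) (by omega)

lemma bkeep_self (A : List Int) (i : Nat) : bkeep A i i = true := by
  rw [bkeep_iff]
  omega

lemma mem_bcdq {A : List Int} {lo i j : Nat} (h : j ∈ bcdq A lo i) :
    lo ≤ j ∧ j ≤ i ∧ bkeep A i j = true := by
  rw [bcdq, List.mem_filter, List.mem_range'_1] at h
  exact ⟨by omega, by omega, h.2⟩

lemma bcdq_pairwise_lt (A : List Int) (lo i : Nat) :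
    (bcdq A lo i).Pairwise (· < ·) :=
  (List.pairwise_lt_range' 1).filter _

lemma bcdq_pairwise_val (A : List Int) (lo i : Nat) :
    (bcdq A lo i).Pairwise (fun a b => bag A a < bag A b) := by
  refine (bcdq_pairwise_lt A lo i).imp_of_mem ?_
  intro a b ha hb hab
  rcases mem_bcdq ha with ⟨_, _, hk⟩
  rcases mem_bcdq hb with ⟨_, hb2, _⟩
  exact (bkeep_iff A i a).1 hk b hab hb2

lemma bcdq_ne_nil (A : List Int) {lo i : Nat} (h : lo ≤ i) : bcdq A lo i ≠ [] := by
  have : i ∈ bcdq A lo i := by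
    rw [bcdq, List.mem_filter, List.mem_range'_1]
    exact ⟨by omega, bkeep_self A i⟩
  exact List.ne_nil_of_mem this

lemma bcdq_self (A : List Int) (i : Nat) : bcdq A i i = [i] := by
  rw [bcdq]
  have : i + 1 - i = 1 := by omega
  rw [this]
  simp [List.range', bkeep_self]

lemma bcdq_succ (A : List Int) {lo i : Nat} (h : lo ≤ i + 1) :
    bcdq A lo (i+1) = (bcdq A lo i).filter (fun j => decide (bag A j < bag A (i+1))) ++ [i+1] := by
  have h1 : i + 1 + 1 - lo = (i + 1 - lo) + 1 := by omega
  have h2 : List.range' lo (i + 1 + 1 - lo) = List.range' lo (i + 1 - lo) ++ [i+1] := by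
    rw [h1, List.range'_concat]
    congr 2
    omega
  rw [bcdq, h2, List.filter_append]
  congr 1
  · rw [bcdq, List.filter_filter]
    refine List.filter_congr ?_
    intro j hj
    rw [List.mem_range'_1] at hj
    have hji : j ≤ i := by omega
    rw [Bool.eq_iff_iff, Bool.and_eq_true, decide_eq_true_eq, bkeep_iff, bkeep_iff]
    constructor
    · intro hb
      exact ⟨hb (i+1) (by omega) le_rfl, fun t h1t h2t => hb t h1t (by omega)⟩
    · rintro ⟨hlt, hb⟩ t h1t h2t
      rcases Nat.lt_or_ge t (i+1) with h3 | h3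
      · exact hb t h1t (by omega)
      · have ht : t = i + 1 := by omega
        subst ht
        exact hlt
  · simp [bkeep_self]

lemma bcdq_step_lo (A : List Int) {lo i : Nat} (h : lo ≤ i) :
    bcdq A lo i = (if bkeep A i lo then [lo] else []) ++ bcdq A (lo+1) i := by
  have h1 : i + 1 - lo = (i - lo) + 1 := by omega
  have h2 : List.range' lo (i + 1 - lo) = lo :: List.range' (lo+1) (i - lo) := by
    rw [h1, List.range'_succ]
  rw [bcdq, h2, List.filter_cons, bcdq]
  have : i + 1 - (lo + 1) = i - lo := by omega
  rw [this]
  by_cases hk : bkeep A i lo <;> simp [hk]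

lemma bcdq_headD_of_keep (A : List Int) {lo i : Nat} (h : lo ≤ i) (hk : bkeep A i lo = true) :
    (bcdq A lo i).headD 0 = lo := by
  rw [bcdq_step_lo A h, if_pos hk]
  rfl

lemma bcdq_eq_of_not_keep (A : List Int) {lo i : Nat} (h : lo ≤ i) (hk : ¬ bkeep A i lo = true) :
    bcdq A lo i = bcdq A (lo+1) i := by
  rw [bcdq_step_lo A h, if_neg hk]
  rfl

lemma bag_bcdq_headD (A : List Int) : ∀ d lo i, i - lo = d → lo ≤ i →
    bag A ((bcdq A lo i).headD 0) = bwmin A lo i := by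
  intro d
  induction d using Nat.strong_induction_on with
  | _ d ih =>
    intro lo i hd hle
    by_cases hk : bkeep A i lo = true
    · rw [bcdq_headD_of_keep A hle hk,
        bwmin_eq_bag A (fun t h1 h2 => (bkeep_iff A i lo).1 hk t h1 h2)]
    · have hlt : lo < i := by
        rcases Nat.eq_or_lt_of_le hle with h' | h'
        · exact absurd (h' ▸ bkeep_self A i) hk
        · exact h'
      rw [bcdq_eq_of_not_keep A hle hk,
        ih (i - (lo+1)) (by omega) (lo+1) i rfl (by omega), bwmin_cons A hlt]
      have hex : ∃ t, lo < t ∧ t ≤ i ∧ bag A t ≤ bag A lo := by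
        by_contra hc
        push Not at hc
        exact hk ((bkeep_iff A i lo).2 (fun t h1 h2 => hc t h1 h2))
      obtain ⟨t, h1, h2, h3⟩ := hex
      exact (min_eq_right (le_trans (bwmin_le A (show lo+1 ≤ t by omega) h2) h3)).symm

-- the mn array during pass 1
lemma length_bmn1 (A : List Int) (kk m : Nat) : (bmn1 A kk m).length = A.length := by
  induction m with
  | zero => rfl
  | succ m ih => rw [bmn1, List.length_set, ih]

lemma bag_bmn1 (A : List Int) (kk : Nat) : ∀ m j, m ≤ A.length →
    bag (bmn1 A kk m) j = if j < m then bwmin A (j - kk) j else bag A j := by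
  intro m
  induction m with
  | zero => simp [bmn1]
  | succ m ih =>
    intro j hm
    rw [bmn1]
    show ((bmn1 A kk m).set m _).getD j 0 = _
    rw [List.getD_eq_getElem?_getD, List.getElem?_set, length_bmn1]
    rcases Nat.lt_trichotomy j m with hj | hj | hj
    · rw [if_neg (by omega), ← List.getD_eq_getElem?_getD]
      have := ih j (by omega)
      rw [show bag (bmn1 A kk m) j = (bmn1 A kk m).getD j 0 from rfl] at this
      rw [this, if_pos hj, if_pos (by omega)]
    · subst hj
      rw [if_pos rfl, if_pos (by omega), if_pos (by omega)]
      rfl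
    · rw [if_neg (by omega), if_neg (by omega), ← List.getD_eq_getElem?_getD]
      have := ih j (by omega)
      rw [show bag (bmn1 A kk m) j = (bmn1 A kk m).getD j 0 from rfl] at this
      rw [this, if_neg (by omega)]

lemma rdropWhile_map {α β : Type} (f : α → β) (p : β → Bool) (l : List α) :
    (l.map f).rdropWhile p = (l.rdropWhile (fun a => p (f a))).map f := by
  rw [List.rdropWhile, List.rdropWhile, ← List.map_reverse, List.dropWhile_map,
    List.map_reverse]
  rfl

lemma pyGetD_bag (A : List Int) (j : Nat) : PySem.List.pyGetD A (j:Int) 0 = bag A j := by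
  rw [PySem.List.pyGetD_natCast]
  rfl

-- Nat indices cast to the Int indices the port stores
def bcast (l : List Nat) : List Int := l.map (fun j : Nat => (j : Int))

lemma bcast_cons (a : Nat) (t : List Nat) : bcast (a :: t) = (a : Int) :: bcast t := rfl
lemma bcast_append (l1 l2 : List Nat) : bcast (l1 ++ l2) = bcast l1 ++ bcast l2 :=
  List.map_append ..

-- deque (as Int list) after pop-from-back and append at step m of pass 1
lemma pass1_que2 (A : List Int) (kk m : Nat) :
    (bcast (bdq A kk m)).rdropWhile
        (fun x => decide (PySem.List.pyGetD A (m:Int) 0 ≤ PySem.List.pyGetD A x 0)) ++ [(m:Int)]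
      = bcast (bcdq A (m - 1 - kk) m) := by
  rw [bcast, rdropWhile_map]
  simp only [pyGetD_bag]
  rcases m with _ | i
  ·  simp [bdq, bcdq_self, List.rdropWhile, bcast]
  · rw [show bdq A kk (i+1) = bcdq A (i - kk) i from if_neg (by omega)]
    rw [chain_rdropWhile _ _ ((bcdq_pairwise_val A (i - kk) i).imp
      (fun {a b} hab => by
        simp only [decide_eq_true_eq]
        intro h
        exact le_trans h (le_of_lt hab)))]
    rw [List.filter_congr (l := bcdq A (i - kk) i)
      (q := fun j => decide (bag A j < bag A (i+1)))
      (fun j _ => by simp only [← decide_not, decide_eq_decide]; omega)]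
    show bcast (List.filter _ (bcdq A (i - kk) i)) ++ bcast [i+1] = _
    rw [← bcast_append, ← bcdq_succ A (show i - kk ≤ i + 1 by omega),
      show i + 1 - 1 - kk = i - kk from by omega]

-- the expire step of pass 1 turns the window [m-1-kk, m] deque into the [m-kk, m] one
lemma pass1_que3 (A : List Int) (kk m : Nat) :
    (if PySem.List.pyGetD (bcast (bcdq A (m - 1 - kk) m)) 0 0 < (m:Int) - (kk:Int)
      then (bcast (bcdq A (m - 1 - kk) m)).tail else bcast (bcdq A (m - 1 - kk) m))
    = bcast (bcdq A (m - kk) m) := by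
  have h1 : m - 1 - kk ≤ m := by omega
  by_cases hcap : kk < m
  · by_cases hk : bkeep A m (m - 1 - kk) = true
    · rw [bcdq_step_lo A h1, if_pos hk, List.singleton_append, bcast_cons,
        PySem.List.pyGetD_zero_cons, if_pos (by omega), List.tail_cons,
        show m - 1 - kk + 1 = m - kk from by omega]
    · rw [bcdq_eq_of_not_keep A h1 hk, show m - 1 - kk + 1 = m - kk from by omega]
      obtain ⟨hd, tl, hC⟩ := List.exists_cons_of_ne_nil (bcdq_ne_nil A (Nat.sub_le m kk))
      have hge : m - kk ≤ hd := (mem_bcdq (hC ▸ List.mem_cons_self ..)).1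
      rw [hC, bcast_cons, PySem.List.pyGetD_zero_cons, if_neg (by omega)]
  · have he : m - kk = m - 1 - kk := by omega
    rw [← he] at h1 ⊢
    obtain ⟨hd, tl, hC⟩ := List.exists_cons_of_ne_nil (bcdq_ne_nil A (Nat.sub_le m kk))
    rw [hC, bcast_cons, PySem.List.pyGetD_zero_cons, if_neg (by omega)]

-- the mn update of pass 1 writes the left-window minimum
lemma pass1_mn (A : List Int) (kk m : Nat) (hm : m < A.length) :
    PySem.List.pySetD (bmn1 A kk m) (m:Int)
      (min (PySem.List.pyGetD (bmn1 A kk m) (m:Int) 0)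
           (PySem.List.pyGetD A (PySem.List.pyGetD (bcast (bcdq A (m - kk) m)) 0 0) 0))
    = bmn1 A kk (m+1) := by
  have h2 : m - kk ≤ m := Nat.sub_le ..
  obtain ⟨hd, tl, hC⟩ := List.exists_cons_of_ne_nil (bcdq_ne_nil A h2)
  have hhd : bag A hd = bwmin A (m - kk) m := by
    have := bag_bcdq_headD A (m - (m - kk)) (m - kk) m rfl h2
    rwa [hC] at this
  rw [hC, bcast_cons, PySem.List.pyGetD_zero_cons, pyGetD_bag A hd, hhd,
    pyGetD_bag (bmn1 A kk m) m, bag_bmn1 A kk m m (le_of_lt hm), if_neg (lt_irrefl m),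
    min_eq_right (bwmin_le A h2 le_rfl), PySem.List.pySetD_natCast]
  rfl

lemma step1_eq (A : List Int) (kk m : Nat) (hm : m < A.length) :
    businessStep1 A (kk:Int) (bcast (bdq A kk m), bmn1 A kk m) (m:Int)
    = (bcast (bdq A kk (m+1)), bmn1 A kk (m+1)) := by
  simp only [businessStep1]
  rw [pass1_que2 A kk m, pass1_que3 A kk m, pass1_mn A kk m hm,
    show bdq A kk (m+1) = bcdq A (m - kk) m from by simp [bdq]]

lemma pass1_loop (A : List Int) (kk : Nat) : ∀ m, m ≤ A.length →
    (List.range m).foldl (fun st (j : Nat) => businessStep1 A (kk:Int) st (j:Int)) ([], A)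
    = (bcast (bdq A kk m), bmn1 A kk m) := by
  intro m
  induction m with
  | zero => intro _; simp [bdq, bmn1, bcast]
  | succ m ih =>
    intro hm
    rw [List.range_succ, List.foldl_append, ih (by omega)]
    simp only [List.foldl_cons, List.foldl_nil]
    exact step1_eq A kk m (by omega)

-- membership / characterisation of the pass-2 deque
lemma bkeep2_iff (A : List Int) (i j : Nat) :
    bkeep2 A i j = true ↔ ∀ t, i ≤ t → t < j → bag A j < bag A t := by
  rw [bkeep2, List.all_eq_true]
  constructor
  · intro h t h1 h2
    have := h t (by rw [List.mem_range'_1]; omega)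
    simpa using this
  · intro h t ht
    rw [List.mem_range'_1] at ht
    simpa using h t (by omega) (by omega)

lemma bkeep2_self (A : List Int) (i : Nat) : bkeep2 A i i = true := by
  rw [bkeep2_iff]
  omega

lemma mem_bcdq2 {A : List Int} {i hi j : Nat} (h : j ∈ bcdq2 A i hi) :
    i ≤ j ∧ j ≤ hi ∧ bkeep2 A i j = true := by
  rw [bcdq2, List.mem_filter, List.mem_range'_1] at h
  exact ⟨by omega, by omega, h.2⟩

lemma bcdq2_pairwise_val (A : List Int) (i hi : Nat) :
    (bcdq2 A i hi).Pairwise (fun a b => bag A b < bag A a) := by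
  refine ((List.pairwise_lt_range' (s := i) (n := hi+1-i) 1).filter _).imp_of_mem ?_
  intro a b ha hb hab
  rcases mem_bcdq2 ha with ⟨ha1, _, _⟩
  rcases mem_bcdq2 hb with ⟨_, _, hk⟩
  exact (bkeep2_iff A i b).1 hk a ha1 hab

lemma bcdq2_ne_nil (A : List Int) {i hi : Nat} (h : i ≤ hi) : bcdq2 A i hi ≠ [] := by
  have : i ∈ bcdq2 A i hi := by
    rw [bcdq2, List.mem_filter, List.mem_range'_1]
    exact ⟨by omega, bkeep2_self A i⟩
  exact List.ne_nil_of_mem this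

lemma bcdq2_self (A : List Int) (i : Nat) : bcdq2 A i i = [i] := by
  rw [bcdq2]
  have : i + 1 - i = 1 := by omega
  rw [this]
  simp [List.range', bkeep2_self]

lemma bcdq2_lo_cons (A : List Int) {i hi : Nat} (h : i ≤ hi) :
    bcdq2 A i hi = i :: (bcdq2 A (i+1) hi).filter (fun j => decide (bag A j < bag A i)) := by
  have h1 : hi + 1 - i = (hi - i) + 1 := by omega
  have h2 : List.range' i (hi + 1 - i) = i :: List.range' (i+1) (hi - i) := by
    rw [h1, List.range'_succ]
  rw [bcdq2, h2, List.filter_cons_of_pos (bkeep2_self A i)]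
  congr 1
  rw [bcdq2, show hi + 1 - (i+1) = hi - i from by omega, List.filter_filter]
  refine List.filter_congr ?_
  intro j hj
  rw [List.mem_range'_1] at hj
  rw [Bool.eq_iff_iff, Bool.and_eq_true, decide_eq_true_eq, bkeep2_iff, bkeep2_iff]
  constructor
  · intro hb
    exact ⟨hb i le_rfl (by omega), fun t h1t h2t => hb t (by omega) h2t⟩
  · rintro ⟨hlt, hb⟩ t h1t h2t
    rcases Nat.lt_or_ge t (i+1) with h3 | h3
    · have ht : t = i := by omega
      subst ht
      exact hlt
    · exact hb t h3 h2t

lemma bcdq2_step_hi (A : List Int) {i hi : Nat} (h : i ≤ hi + 1) :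
    bcdq2 A i (hi+1) = bcdq2 A i hi ++ (if bkeep2 A i (hi+1) then [hi+1] else []) := by
  have h1 : hi + 1 + 1 - i = (hi + 1 - i) + 1 := by omega
  have h2 : List.range' i (hi + 1 + 1 - i) = List.range' i (hi + 1 - i) ++ [hi+1] := by
    rw [h1, List.range'_concat]
    congr 2
    omega
  rw [bcdq2, h2, List.filter_append]
  congr 1
  rw [List.filter_cons, List.filter_nil]

lemma bwmin_eq_bag2 (A : List Int) {i hi : Nat} (hle : i ≤ hi)
    (h : ∀ t, i ≤ t → t < hi → bag A hi < bag A t) : bwmin A i hi = bag A hi := by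
  refine le_antisymm (bwmin_le A hle le_rfl) (le_bfmin A ?_ ?_)
  · rcases Nat.eq_or_lt_of_le hle with h' | h'
    · rw [h']
    · exact le_of_lt (h i le_rfl h')
  · intro t ht
    rw [List.mem_range'_1] at ht
    rcases Nat.lt_or_ge t hi with h3 | h3
    · exact le_of_lt (h t (by omega) h3)
    · have : t = hi := by omega
      rw [this]

lemma bag_bcdq2_getLastD (A : List Int) : ∀ d i hi, hi - i = d → i ≤ hi →
    bag A ((bcdq2 A i hi).getLastD 0) = bwmin A i hi := by
  intro d
  induction d using Nat.strong_induction_on with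
  | _ d ih =>
    intro i hi hd hle
    rcases Nat.eq_or_lt_of_le hle with he | hlt
    · rw [← he, bcdq2_self, bwmin_self]
      rfl
    · obtain ⟨h, rfl⟩ : ∃ h, hi = h + 1 := ⟨hi - 1, by omega⟩
      rw [bcdq2_step_hi A (by omega)]
      by_cases hk : bkeep2 A i (h+1) = true
      · rw [if_pos hk, List.getLastD_concat,
          bwmin_eq_bag2 A hle (fun t h1 h2 => (bkeep2_iff A i (h+1)).1 hk t h1 h2)]
      · rw [if_neg hk, List.append_nil,
          ih (h - i) (by omega) i h rfl (by omega), bwmin_concat A (by omega)]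
        have hex : ∃ t, i ≤ t ∧ t < h + 1 ∧ bag A t ≤ bag A (h+1) := by
          by_contra hc
          push Not at hc
          exact hk ((bkeep2_iff A i (h+1)).2 (fun t h1 h2 => hc t h1 h2))
        obtain ⟨t, h1, h2, h3⟩ := hex
        exact (min_eq_left (le_trans (bwmin_le A h1 (by omega)) h3)).symm

lemma length_bmn2 (A : List Int) (kk n : Nat) : ∀ c, (bmn2 A kk n c).length = A.length := by
  intro c
  induction c with
  | zero => exact length_bmn1 A kk n
  | succ c ih => rw [bmn2, List.length_set, ih]

lemma bag_bmn2 (A : List Int) (kk n : Nat) : ∀ c j, c ≤ n → n ≤ A.length →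
    bag (bmn2 A kk n c) j = if n - c ≤ j ∧ j < n then
        min (bwmin A (j - kk) j) (bwmin A j (min (n-1) (j+kk)))
      else bag (bmn1 A kk n) j := by
  intro c
  induction c with
  | zero =>
    intro j _ _
    rw [if_neg (by omega)]
    rfl
  | succ c ih =>
    intro j hc hn
    rw [bmn2]
    show ((bmn2 A kk n c).set (n-c-1) _).getD j 0 = _
    rw [List.getD_eq_getElem?_getD, List.getElem?_set, length_bmn2]
    by_cases hj : n - c - 1 = j
    · subst hj
      rw [if_pos rfl, if_pos (by omega), if_pos (by omega)]
      simp only [Option.getD_some]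
    · rw [if_neg hj, ← List.getD_eq_getElem?_getD]
      have := ih j (by omega) hn
      rw [show bag (bmn2 A kk n c) j = (bmn2 A kk n c).getD j 0 from rfl] at this
      rw [this]
      by_cases hj2 : n - c ≤ j ∧ j < n
      · rw [if_pos hj2, if_pos (by omega)]
      · rw [if_neg hj2, if_neg (by omega)]

lemma pyGetD_neg_one_bcast (l : List Nat) (h : l ≠ []) :
    PySem.List.pyGetD (bcast l) (-1) 0 = ((l.getLastD 0 : Nat) : Int) := by
  conv_lhs => rw [← List.dropLast_append_getLast h]
  rw [bcast_append, show bcast [l.getLast h] = [((l.getLast h : Nat) : Int)] from rfl,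
    PySem.List.pyGetD_neg_one_append_singleton]
  conv_rhs => rw [← List.dropLast_append_getLast h]
  rw [List.getLastD_concat]

lemma bcdq2_getLastD_le (A : List Int) {i hi : Nat} (h : i ≤ hi) :
    (bcdq2 A i hi).getLastD 0 ≤ hi := by
  rcases List.eq_nil_or_concat (bcdq2 A i hi) with he | ⟨L, b, he⟩
  · exact absurd he (bcdq2_ne_nil A h)
  · rw [he, List.concat_eq_append, List.getLastD_concat]
    have hb : b ∈ bcdq2 A i hi := by
      rw [he, List.concat_eq_append]
      exact List.mem_append_right L (List.mem_cons_self ..)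
    exact (mem_bcdq2 hb).2.1

-- prepending the new index after the pop-from-front loop yields the canonical deque
lemma bcdq2_push (A : List Int) (i hi : Nat) (h : i + 1 ≤ hi) :
    ((i : Nat) : Int) :: (bcast (bcdq2 A (i+1) hi)).dropWhile
        (fun x => decide (PySem.List.pyGetD A (i:Int) 0 ≤ PySem.List.pyGetD A x 0))
    = bcast (bcdq2 A i hi) := by
  rw [bcast, List.dropWhile_map]
  simp only [Function.comp_def, pyGetD_bag]
  rw [chain_dropWhile _ _ ((bcdq2_pairwise_val A (i+1) hi).imp
    (fun {a b} hab => by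
      simp only [decide_eq_true_eq]
      intro hq
      exact le_trans hq (le_of_lt hab)))]
  rw [List.filter_congr (l := bcdq2 A (i+1) hi)
    (q := fun j => decide (bag A j < bag A i))
    (fun j _ => by simp only [← decide_not, decide_eq_decide]; omega)]
  show bcast (i :: List.filter _ (bcdq2 A (i+1) hi)) = _
  rw [← bcdq2_lo_cons A (by omega)]

lemma pass2_que2 (A : List Int) (kk n c : Nat) (hc : c < n) :
    ((n - c - 1 : Nat) : Int) :: (bcast (bdq2 A kk n c)).dropWhile
        (fun x => decide (PySem.List.pyGetD A ((n - c - 1 : Nat) : Int) 0 ≤ PySem.List.pyGetD A x 0))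
    = bcast (bcdq2 A (n - c - 1) (min (n - 1) (n - c + kk))) := by
  rcases c with _ | c
  · rw [show bdq2 A kk n 0 = [] from rfl,
      show min (n-1) (n - 0 + kk) = n-1 from by omega,
      show n - 0 - 1 = n - 1 from by omega, bcdq2_self]
    rfl
  · rw [show bdq2 A kk n (c+1) = bcdq2 A (n-(c+1)) (min (n-1) (n-(c+1)+kk)) from
      if_neg (by omega)]
    have key := bcdq2_push A (n-(c+1)-1) (min (n-1) (n-(c+1)+kk)) (by omega)
    rw [show (n-(c+1)-1)+1 = n-(c+1) from by omega] at key
    exact key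

-- the expire step of pass 2 trims the window [i, min(n-1, i+1+kk)] deque to [i, min(n-1, i+kk)]
lemma pass2_que3 (A : List Int) (kk i n : Nat) (hin : i < n) :
    (if (i:Int) + (kk:Int) < PySem.List.pyGetD (bcast (bcdq2 A i (min (n-1) (i+1+kk)))) (-1) 0
      then (bcast (bcdq2 A i (min (n-1) (i+1+kk)))).dropLast
      else bcast (bcdq2 A i (min (n-1) (i+1+kk))))
    = bcast (bcdq2 A i (min (n-1) (i+kk))) := by
  have hi1 : i ≤ min (n-1) (i+kk) := by omega
  by_cases hcap : i + kk < n - 1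
  · rw [show min (n-1) (i+1+kk) = (min (n-1) (i+kk)) + 1 from by omega]
    rw [bcdq2_step_hi A (by omega)]
    by_cases hk : bkeep2 A i (min (n-1) (i+kk) + 1) = true
    · rw [if_pos hk, bcast_append,
        show bcast [min (n-1) (i+kk) + 1] = [((min (n-1) (i+kk) + 1 : Nat) : Int)] from rfl,
        PySem.List.pyGetD_neg_one_append_singleton, if_pos (by omega), List.dropLast_concat]
    · rw [if_neg hk, List.append_nil]
      have hle := bcdq2_getLastD_le A hi1
      rw [pyGetD_neg_one_bcast _ (bcdq2_ne_nil A hi1), if_neg (by omega)]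
  · rw [show min (n-1) (i+1+kk) = min (n-1) (i+kk) from by omega]
    have hle := bcdq2_getLastD_le A hi1
    rw [pyGetD_neg_one_bcast _ (bcdq2_ne_nil A hi1), if_neg (by omega)]

-- the mn update of pass 2 adds the right-window minimum
lemma pass2_mn (A : List Int) (kk n c : Nat) (hc : c < n) (hn : n = A.length) :
    PySem.List.pySetD (bmn2 A kk n c) ((n-c-1 : Nat) : Int)
      (min (PySem.List.pyGetD (bmn2 A kk n c) ((n-c-1 : Nat) : Int) 0)
           (PySem.List.pyGetD A
             (PySem.List.pyGetD (bcast (bcdq2 A (n-c-1) (min (n-1) (n-c-1+kk)))) (-1) 0) 0))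
    = bmn2 A kk n (c+1) := by
  have h1 : n - c - 1 ≤ min (n-1) (n-c-1+kk) := by omega
  rw [pyGetD_neg_one_bcast _ (bcdq2_ne_nil A h1), pyGetD_bag A,
    bag_bcdq2_getLastD A (min (n-1) (n-c-1+kk) - (n-c-1)) (n-c-1) (min (n-1) (n-c-1+kk)) rfl h1,
    pyGetD_bag (bmn2 A kk n c), bag_bmn2 A kk n c (n-c-1) (by omega) (by omega),
    if_neg (by omega), bag_bmn1 A kk n (n-c-1) (by omega), if_pos (by omega),
    PySem.List.pySetD_natCast]
  rfl

lemma step2_eq (A : List Int) (kk n c : Nat) (hc : c < n) (hn : n = A.length) :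
    businessStep2 A (kk:Int) (bcast (bdq2 A kk n c), bmn2 A kk n c) ((n-c-1 : Nat) : Int)
    = (bcast (bdq2 A kk n (c+1)), bmn2 A kk n (c+1)) := by
  simp only [businessStep2]
  rw [pass2_que2 A kk n c hc,
    show min (n-1) (n-c+kk) = min (n-1) ((n-c-1)+1+kk) from by omega,
    pass2_que3 A kk (n-c-1) n (by omega),
    pass2_mn A kk n c hc hn,
    show bdq2 A kk n (c+1) = bcdq2 A (n-c-1) (min (n-1) (n-c-1+kk)) from by
      rw [bdq2, if_neg (by omega), show n - (c+1) = n - c - 1 from by omega]]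

lemma pass2_loop (A : List Int) (kk n : Nat) (hn : n = A.length) : ∀ c, c ≤ n →
    ((List.range' (n-c) c).reverse).foldl
        (fun st (j : Nat) => businessStep2 A (kk:Int) st (j:Int)) ([], bmn1 A kk n)
    = (bcast (bdq2 A kk n c), bmn2 A kk n c) := by
  intro c
  induction c with
  | zero => intro _; rfl
  | succ c ih =>
    intro hc
    have h2 : List.range' (n-(c+1)) (c+1) = (n-c-1) :: List.range' (n-c) c := by
      rw [List.range'_succ, show n-(c+1)+1 = n-c from by omega,
        show n-(c+1) = n-c-1 from by omega]
    rw [h2, List.reverse_cons, List.foldl_append, ih (by omega)]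
    simp only [List.foldl_cons, List.foldl_nil]
    exact step2_eq A kk n c (by omega) hn

lemma bag_eq_getElem (A : List Int) {t : Nat} (h : t < A.length) : bag A t = A[t] := by
  rw [bag, List.getD_eq_getElem?_getD, List.getElem?_eq_getElem h]
  rfl

lemma drop_take_map_bag (A : List Int) (lo c : Nat) (h : lo + c ≤ A.length) :
    (A.drop lo).take c = (List.range' lo c).map (bag A) := by
  apply List.ext_getElem
  · rw [List.length_take, List.length_drop, List.length_map, List.length_range']
    omega
  · intro r h1 h2
    simp only [List.length_take, List.length_drop] at h1
    rw [List.getElem_take, List.getElem_drop, List.getElem_map, List.getElem_range',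
      bag_eq_getElem A (by omega)]
    congr 1
    omega

-- B's slice minimum is the window minimum
lemma slice_window (A : List Int) (kk j : Nat) (hj : j < A.length) :
    ((PySem.List.min? (PySem.List.slice A (some (max 0 ((j:Int) - (kk:Int))))
        (some (min (A.length:Int) ((j:Int) + (kk:Int) + 1)))) (fun x => x)).getD 0)
    = bwmin A (j - kk) (min (A.length - 1) (j + kk)) := by
  have hmax : max 0 ((j:Int) - (kk:Int)) = ((j - kk : Nat) : Int) := by omega
  have hmin : min (A.length:Int) ((j:Int) + (kk:Int) + 1)
      = ((min A.length (j+kk+1) : Nat) : Int) := by omega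
  rw [hmax, hmin, PySem.List.slice_natCast]
  have hc : min A.length (j+kk+1) - (j - kk) = (min (A.length - 1) (j + kk)) + 1 - (j - kk) := by
    omega
  rw [hc, drop_take_map_bag A (j-kk) _ (by omega),
    show List.range' (j-kk) ((min (A.length - 1) (j + kk)) + 1 - (j - kk))
        = (j-kk) :: List.range' (j-kk+1) ((min (A.length - 1) (j + kk)) - (j - kk)) from by
      rw [show (min (A.length - 1) (j + kk)) + 1 - (j - kk)
          = ((min (A.length - 1) (j + kk)) - (j - kk)) + 1 from by omega, List.range'_succ],
    List.map_cons, PySem.List.min?_id_cons, Option.getD_some, List.foldl_map]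
  rfl

-- both passes of A, chained, compute the full-window minima
lemma business_eq (A : List Int) (k : Int) :
    business A k = List.zipWith (fun a b => a - b) A (bmn2 A (k.natAbs) A.length A.length) := by
  have hkk : ((k.natAbs : Nat) : Int) = |k| := by rw [Int.abs_eq_natAbs]
  simp only [business]
  have hrange : PySem.List.pyRange 0 (A.length:Int) 1
      = (List.range A.length).map (fun j : Nat => (j:Int)) := by
    rw [PySem.List.pyRange_one]
    simp
  have hf1 : (List.range A.length).foldl
        (fun st (j : Nat) => businessStep1 A |k| st ((fun j : Nat => (j:Int)) j)) ([], A)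
      = (bcast (bdq A k.natAbs A.length), bmn1 A k.natAbs A.length) := by
    rw [show (fun st (j : Nat) => businessStep1 A |k| st ((fun j : Nat => (j:Int)) j))
        = (fun st (j : Nat) => businessStep1 A ((k.natAbs : Nat):Int) st (j:Int)) from by
      funext st j
      rw [hkk]]
    exact pass1_loop A k.natAbs A.length le_rfl
  rw [hrange, List.foldl_map, hf1]
  rw [← List.map_reverse, List.foldl_map]
  have hf2 : ((List.range A.length).reverse).foldl
        (fun st (j : Nat) => businessStep2 A |k| st ((fun j : Nat => (j:Int)) j))
        ([], bmn1 A k.natAbs A.length)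
      = (bcast (bdq2 A k.natAbs A.length A.length), bmn2 A k.natAbs A.length A.length) := by
    rw [show (fun st (j : Nat) => businessStep2 A |k| st ((fun j : Nat => (j:Int)) j))
        = (fun st (j : Nat) => businessStep2 A ((k.natAbs : Nat):Int) st (j:Int)) from by
      funext st j
      rw [hkk]]
    rw [List.range_eq_range', show List.range' 0 A.length = List.range' (A.length - A.length) A.length from by
      rw [Nat.sub_self]]
    exact pass2_loop A k.natAbs A.length rfl A.length le_rfl
  rw [hf2]

lemma business_alt_eq (A : List Int) (k : Int) :
    business_alt A k = (List.range A.length).map (fun j : Nat =>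
      PySem.List.pyGetD A (j:Int) 0 -
        ((PySem.List.min? (PySem.List.slice A (some (max 0 ((j:Int) - ((k.natAbs:Nat):Int))))
          (some (min (A.length:Int) ((j:Int) + ((k.natAbs:Nat):Int) + 1)))) (fun x => x)).getD 0)) := by
  have hkk : ((k.natAbs : Nat) : Int) = |k| := by rw [Int.abs_eq_natAbs]
  simp only [business_alt]
  rw [show PySem.List.pyRange 0 (A.length:Int) 1
      = (List.range A.length).map (fun j : Nat => (j:Int)) from by
    rw [PySem.List.pyRange_one]
    simp]
  rw [List.map_map]
  refine List.map_congr_left ?_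
  intro j _
  simp only [Function.comp_apply]
  rw [hkk]

lemma business_eq_alt (A : List Int) (k : Int) : business A k = business_alt A k := by
  rw [business_eq, business_alt_eq]
  have hlen2 := length_bmn2 A k.natAbs A.length A.length
  apply List.ext_getElem
  · rw [List.length_zipWith, hlen2, List.length_map, List.length_range]
    omega
  · intro r h1 h2
    have hr : r < A.length := by
      rw [List.length_zipWith, hlen2] at h1
      omega
    rw [List.getElem_zipWith, List.getElem_map, List.getElem_range,
      show (bmn2 A k.natAbs A.length A.length)[r] = bag (bmn2 A k.natAbs A.length A.length) r from
        (bag_eq_getElem _ (by omega)).symm,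
      bag_bmn2 A k.natAbs A.length A.length r le_rfl le_rfl, if_pos (by omega),
      bwmin_split A (Nat.sub_le r k.natAbs) (by omega),
      pyGetD_bag A r, slice_window A k.natAbs r hr, bag_eq_getElem A hr]

-- ===== VERDICT (by name: the statement is the Claim_ definition above) =====
theorem business_spec : Claim_equal_business := by
  intro A k _
  exact business_eq_alt A k
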